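-- pv_equiv track=rewrite | github.com/trp07/Cryptopals | Set1/_set1.py | freq_count
-- ===== SOURCE A (Python) =====
-- def freq_count(s:str) -> int:
--     """
--     Does a basic frequency count of the decoded-string 's' based on the
--     preponderance of the letters ETAOIN SHRDLU in the English language.
--     Returns an integer of the count.
--     """
--     count = 0
--     for letter in s:
--         if letter.upper() in ('ABCDEFGHIJKLMNOPQRSTUVWXYZ'):
--             count += 4
--         elif letter in ('0123456789., \n\t'):
--             count += 2
--         elif letter in ('?!/-'):
--             count += 1
--     return count
-- ===== SOURCE B (Python) =====
-- # Staged counting: uppercase once, then tally each category alphabet with str.count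
-- # and combine the three category totals with their weights (no per-character branch).
-- def freq_count(s: str) -> int:
--     u = s.upper()
--     return (4 * sum(u.count(c) for c in 'ABCDEFGHIJKLMNOPQRSTUVWXYZ')
--             + 2 * sum(s.count(c) for c in '0123456789., \n\t')
--             + sum(s.count(c) for c in '?!/-'))
-- ===== Notes on version B (the rewrite author's own statement) =====
-- stated objective: alternative
-- what changed: Instead of branching per character of s, B uppercases s once and iterates over the three category alphabets, tallying each category with str.count and combining the three weighted totals; the traversal is over the alphabets, not a per-character if/elif chain.
import Mathlib
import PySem

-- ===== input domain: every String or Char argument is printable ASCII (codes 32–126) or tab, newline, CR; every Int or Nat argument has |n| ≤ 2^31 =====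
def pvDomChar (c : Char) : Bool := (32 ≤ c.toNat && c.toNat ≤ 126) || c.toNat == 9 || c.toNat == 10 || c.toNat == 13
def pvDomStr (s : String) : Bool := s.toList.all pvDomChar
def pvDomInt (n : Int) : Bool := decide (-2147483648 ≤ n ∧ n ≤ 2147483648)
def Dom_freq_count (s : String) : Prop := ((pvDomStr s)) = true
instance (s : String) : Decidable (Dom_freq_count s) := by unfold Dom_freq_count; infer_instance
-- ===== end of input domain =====

-- B replaces A's per-character if/elif scoring pass by staged counting: uppercase s once,
-- tally each category alphabet with str.count, and combine the three weighted totals (alternative).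

-- ===== PORT A =====
def freq_count (s : String) : Int :=
  s.toList.foldl
    (fun count letter =>
      if PySem.Chars.upperChar letter ∈ "ABCDEFGHIJKLMNOPQRSTUVWXYZ".toList then count + 4
      else if letter ∈ "0123456789., \n\t".toList then count + 2
      else if letter ∈ "?!/-".toList then count + 1
      else count)
    0

-- ===== PORT B =====
def freq_count_alt (s : String) : Int :=
  let u := PySem.Str.upper s
  4 * ("ABCDEFGHIJKLMNOPQRSTUVWXYZ".toList.map
        (fun c => (PySem.Str.count u (String.ofList [c]) : Int))).sum
  + 2 * ("0123456789., \n\t".toList.map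
        (fun c => (PySem.Str.count s (String.ofList [c]) : Int))).sum
  + ("?!/-".toList.map
        (fun c => (PySem.Str.count s (String.ofList [c]) : Int))).sum

-- ===== PRECONDITION & SPEC =====
def Spec_freq_count (s : String) (out : Int) : Prop := out = freq_count_alt s
instance (s : String) (out : Int) : Decidable (Spec_freq_count s out) := by unfold Spec_freq_count; infer_instance

-- ===== CLAIM (what is proved, stated in full; the proofs are below) =====
def Claim_equal_freq_count : Prop := ∀ (s : String), Dom_freq_count s → Spec_freq_count s (freq_count s)

-- ===== LEMMAS AND PROOFS =====

-- str.count with a single-character needle is the element count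
theorem pvCount_go_singleton (c : Char) :
    ∀ (l : List Char) (fuel acc : Nat), l.length ≤ fuel →
      PySem.Chars.count.go [c] fuel l acc = acc + l.count c := by
  intro l
  induction l with
  | nil => intro fuel acc _; cases fuel <;> simp [PySem.Chars.count.go]
  | cons h t ih =>
    intro fuel acc hle
    cases fuel with
    | zero => simp at hle
    | succ n =>
      simp only [List.length_cons, Nat.succ_le_succ_iff] at hle
      by_cases hc : c = h
      · subst hc
        have hgo := ih n (acc + 1) hle
        simp [PySem.Chars.count.go, List.isPrefixOf, hgo, List.count_cons]
        omega
      · have h1 : (c == h) = false := beq_eq_false_iff_ne.mpr hc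
        have h2 : (h == c) = false := beq_eq_false_iff_ne.mpr (fun e => hc e.symm)
        have hgo := ih n acc hle
        simp [PySem.Chars.count.go, List.isPrefixOf, h1, h2, hgo, List.count_cons]

theorem pvCount_singleton (l : List Char) (c : Char) :
    PySem.Chars.count l [c] = l.count c := by
  have := pvCount_go_singleton c l l.length 0 le_rfl
  simp [PySem.Chars.count, this]

-- weighted sum of counts over a duplicate-free alphabet, one element at a time
def pvSumCounts (A l : List Char) : Int :=
  (A.map (fun a => (l.count a : Int))).sum

theorem pvSumCounts_cons (A : List Char) (hA : A.Nodup) (x : Char) (l : List Char) :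
    pvSumCounts A (x :: l) = pvSumCounts A l + (if x ∈ A then 1 else 0) := by
  induction A with
  | nil => simp [pvSumCounts]
  | cons b B ih =>
    rcases List.nodup_cons.mp hA with ⟨hb, hB⟩
    simp only [pvSumCounts, List.map_cons, List.sum_cons] at *
    by_cases hx : x = b
    · subst hx
      have hxB : x ∉ B := hb
      have : (B.map (fun a => ((x :: l).count a : Int))).sum
           = (B.map (fun a => (l.count a : Int))).sum := by
        apply congrArg
        apply List.map_congr_left
        intro a ha
        have hxa : (x == a) = false := beq_eq_false_iff_ne.mpr (fun e => hxB (e ▸ ha))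
        simp [List.count_cons, hxa]
      rw [this]
      simp [List.count_cons]
      push_cast
      ring
    · have hcnt : ((x :: l).count b : Int) = (l.count b : Int) := by
        have hxb : (x == b) = false := beq_eq_false_iff_ne.mpr hx
        simp [List.count_cons, hxb]
      rw [hcnt, ih hB]
      have : (x ∈ b :: B) ↔ (x ∈ B) := by simp [hx]
      by_cases hxB : x ∈ B <;> simp [hx, hxB] <;> ring

-- A's per-character contribution
def pvStepA (letter : Char) : Int :=
  if PySem.Chars.upperChar letter ∈ "ABCDEFGHIJKLMNOPQRSTUVWXYZ".toList then 4
  else if letter ∈ "0123456789., \n\t".toList then 2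
  else if letter ∈ "?!/-".toList then 1
  else 0

-- the three categories partition each ASCII character's weight (checked over all 128 codes)
set_option maxRecDepth 8000 in
theorem pvStepA_split_ofNat : ∀ n < 128,
    pvStepA (Char.ofNat n)
      = 4 * (if PySem.Chars.upperChar (Char.ofNat n) ∈ "ABCDEFGHIJKLMNOPQRSTUVWXYZ".toList then (1:Int) else 0)
      + 2 * (if Char.ofNat n ∈ "0123456789., \n\t".toList then (1:Int) else 0)
      + (if Char.ofNat n ∈ "?!/-".toList then (1:Int) else 0) := by decide

theorem pvStepA_split (c : Char) (h : pvDomChar c = true) :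
    pvStepA c
      = 4 * (if PySem.Chars.upperChar c ∈ "ABCDEFGHIJKLMNOPQRSTUVWXYZ".toList then (1:Int) else 0)
      + 2 * (if c ∈ "0123456789., \n\t".toList then (1:Int) else 0)
      + (if c ∈ "?!/-".toList then (1:Int) else 0) := by
  have hlt : c.toNat < 128 := by simp [pvDomChar] at h; omega
  have := pvStepA_split_ofNat c.toNat hlt
  rwa [Char.ofNat_toNat] at this

-- alphabets are duplicate-free
theorem pvNodupL : ("ABCDEFGHIJKLMNOPQRSTUVWXYZ".toList).Nodup := by decide
theorem pvNodupD : ("0123456789., \n\t".toList).Nodup := by decide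
theorem pvNodupP : ("?!/-".toList).Nodup := by decide

-- the core list-level identity, by induction on the string's characters
theorem pvMain (l : List Char) (h : ∀ x ∈ l, pvDomChar x = true) :
    (l.map pvStepA).sum
    = 4 * pvSumCounts "ABCDEFGHIJKLMNOPQRSTUVWXYZ".toList (l.map PySem.Chars.upperChar)
      + 2 * pvSumCounts "0123456789., \n\t".toList l
      + pvSumCounts "?!/-".toList l := by
  induction l with
  | nil => simp [pvSumCounts]
  | cons c t ih =>
    have hc : pvDomChar c = true := h c (by simp)
    have ht : ∀ x ∈ t, pvDomChar x = true := fun x hx => h x (by simp [hx])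
    simp only [List.map_cons, List.sum_cons]
    rw [ih ht,
        pvSumCounts_cons _ pvNodupL (PySem.Chars.upperChar c) (t.map PySem.Chars.upperChar),
        pvSumCounts_cons _ pvNodupD c t,
        pvSumCounts_cons _ pvNodupP c t,
        pvStepA_split c hc]
    ring

-- A's fold is the sum of the per-character contributions
theorem pvFoldA (l : List Char) :
    l.foldl
      (fun count letter =>
        if PySem.Chars.upperChar letter ∈ "ABCDEFGHIJKLMNOPQRSTUVWXYZ".toList then count + 4
        else if letter ∈ "0123456789., \n\t".toList then count + 2
        else if letter ∈ "?!/-".toList then count + 1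
        else count) 0
    = (l.map pvStepA).sum := by
  have : l.foldl
      (fun count letter =>
        if PySem.Chars.upperChar letter ∈ "ABCDEFGHIJKLMNOPQRSTUVWXYZ".toList then count + 4
        else if letter ∈ "0123456789., \n\t".toList then count + 2
        else if letter ∈ "?!/-".toList then count + 1
        else count) 0
      = l.foldl (fun count letter => count + pvStepA letter) 0 := by
    apply PySem.List.foldl_congr_mem
    intro a c _
    simp only [pvStepA]
    split_ifs <;> simp
  rw [this, PySem.List.foldl_add]
  simp

-- B's per-alphabet sums, rewritten through single-char counts
theorem pvMapCount (A l : List Char) :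
    (A.map (fun c => (PySem.Chars.count l [c] : Int))).sum = pvSumCounts A l := by
  unfold pvSumCounts
  apply congrArg
  apply List.map_congr_left
  intro a _
  rw [pvCount_singleton]

theorem pvAltEq (s : String) :
    freq_count_alt s
    = 4 * pvSumCounts "ABCDEFGHIJKLMNOPQRSTUVWXYZ".toList (s.toList.map PySem.Chars.upperChar)
      + 2 * pvSumCounts "0123456789., \n\t".toList s.toList
      + pvSumCounts "?!/-".toList s.toList := by
  unfold freq_count_alt
  simp only [PySem.Str.count_eq, PySem.Str.toList_upper, PySem.Chars.upper,
             String.toList_ofList]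
  rw [pvMapCount, pvMapCount, pvMapCount]

-- ===== VERDICT (by name: the statement is the Claim_ definition above) =====
theorem freq_count_spec : Claim_equal_freq_count := by
  intro s hdom
  unfold Spec_freq_count freq_count
  rw [pvFoldA, pvAltEq]
  have hall : ∀ x ∈ s.toList, pvDomChar x = true := by
    have := hdom
    unfold Dom_freq_count pvDomStr at this
    simpa [List.all_eq_true] using this
  exact pvMain s.toList hall
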